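-- pv_equiv track=rewrite | github.com/letuhao/smart-trans-api | pipeline_translategemma.py | _unescape_json_string_value
-- ===== SOURCE A (Python) =====
-- def _unescape_json_string_value(s: str) -> str:
--     """Unescape a JSON string value (\\, \", \\n, \\t, \\[, \\])."""
--     out = []
--     i = 0
--     while i < len(s):
--         if s[i] == "\\" and i + 1 < len(s):
--             n = s[i + 1]
--             if n == "n":
--                 out.append("\n")
--             elif n == "t":
--                 out.append("\t")
--             elif n == '"':
--                 out.append('"')
--             elif n == "\\":
--                 out.append("\\")
--             elif n == "[":
--                 out.append("[")
--             elif n == "]":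
--                 out.append("]")
--             else:
--                 out.append(n)
--             i += 2
--         else:
--             out.append(s[i])
--             i += 1
--     return "".join(out)
-- ===== SOURCE B (Python) =====
-- import re
--
-- _ESC = {'n': '\n', 't': '\t', '"': '"', '\\': '\\', '[': '[', ']': ']'}
-- _PAT = re.compile(r'\\(.)', re.DOTALL)
--
--
-- def _unescape_json_string_value(s: str) -> str:
--     """Unescape a JSON string value via a single regex substitution."""
--     return _PAT.sub(lambda m: _ESC.get(m.group(1), m.group(1)), s)
-- ===== Notes on version B (the rewrite author's own statement) =====
-- stated objective: idiomatic
-- what changed: Replaces the manual index/while loop with elif chain by one compiled regex substitution r'\\(.)' (DOTALL) whose callback maps the captured character through an escape table, defaulting to the character itself; the scan runs in the C regex engine.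
import Mathlib
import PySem

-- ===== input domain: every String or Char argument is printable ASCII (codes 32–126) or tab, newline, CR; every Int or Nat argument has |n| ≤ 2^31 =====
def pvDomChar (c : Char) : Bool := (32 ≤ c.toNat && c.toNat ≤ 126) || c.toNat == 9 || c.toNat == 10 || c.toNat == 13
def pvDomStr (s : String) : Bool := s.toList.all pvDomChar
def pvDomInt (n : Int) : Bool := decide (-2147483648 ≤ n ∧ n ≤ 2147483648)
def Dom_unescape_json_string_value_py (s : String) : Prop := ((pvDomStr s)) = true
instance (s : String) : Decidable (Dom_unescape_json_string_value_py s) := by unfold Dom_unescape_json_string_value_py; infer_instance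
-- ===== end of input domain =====

-- B replaces A's manual index loop + elif chain by a single regex-style substitution over escape pairs (idiomatic rewrite, same cost).


-- ===== PORT A =====
-- Port of A: index-based while loop; the loop guard proves the index in range, so plain
-- list indexing (getD) is exact for Python's s[i] / s[i+1] here.
def unescALoop (cs : List Char) (i : Nat) (out : List Char) : List Char :=
  if _h : i < cs.length then
    if cs.getD i ' ' = '\\' ∧ i + 1 < cs.length then
      let n := cs.getD (i + 1) ' '
      let o : Char :=
        if n = 'n' then '\n'
        else if n = 't' then '\t'
        else if n = '"' then '"'
        else if n = '\\' then '\\'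
        else if n = '[' then '['
        else if n = ']' then ']'
        else n
      unescALoop cs (i + 2) (out ++ [o])
    else
      unescALoop cs (i + 1) (out ++ [cs.getD i ' '])
  else out
termination_by cs.length - i

def unescape_json_string_value_py (s : String) : String :=
  String.mk (unescALoop s.toList 0 [])

-- ===== PORT B =====
-- Port of B: the escape table _ESC as a PySem.Dict, and the regex substitution
-- re.sub(r'\\(.)', repl, s, DOTALL) ported by hand as the standard left-to-right scan
-- that regex sub performs: each '\\'+char match is replaced, everything else copied.
def escDict : PySem.Dict Char Char :=
  PySem.Dict.ofList [('n', '\n'), ('t', '\t'), ('"', '"'), ('\\', '\\'), ('[', '['), (']', ']')]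

def subEsc : List Char → List Char
  | [] => []
  | c :: rest =>
    if c = '\\' then
      match rest with
      | [] => [c]
      | c2 :: rs => PySem.Dict.getD escDict c2 c2 :: subEsc rs
    else c :: subEsc rest

def unescape_json_string_value_py_alt (s : String) : String :=
  String.mk (subEsc s.toList)

-- ===== PRECONDITION & SPEC =====
def Spec_unescape_json_string_value_py (s : String) (out : String) : Prop := out = unescape_json_string_value_py_alt s
instance (s : String) (out : String) : Decidable (Spec_unescape_json_string_value_py s out) := by unfold Spec_unescape_json_string_value_py; infer_instance

-- ===== CLAIM (what is proved, stated in full; the proofs are below) =====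
def Claim_equal_unescape_json_string_value_py : Prop := ∀ (s : String), Dom_unescape_json_string_value_py s → Spec_unescape_json_string_value_py s (unescape_json_string_value_py s)

-- ===== LEMMAS AND PROOFS =====

lemma repl_eq (n : Char) :
    (if n = 'n' then '\n'
     else if n = 't' then '\t'
     else if n = '"' then '"'
     else if n = '\\' then '\\'
     else if n = '[' then '['
     else if n = ']' then ']'
     else n) = PySem.Dict.getD escDict n n := by
  have hd : escDict = PySem.Dict.mk
      [('n', '\n'), ('t', '\t'), ('"', '"'), ('\\', '\\'), ('[', '['), (']', ']')] := by decide
  rw [hd]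
  split_ifs with h1 h2 h3 h4 h5 h6
  · subst h1; decide
  · subst h2; decide
  · subst h3; decide
  · subst h4; decide
  · subst h5; decide
  · subst h6; decide
  · simp [PySem.Dict.getD, PySem.Dict.get?,
      Ne.symm h1, Ne.symm h2, Ne.symm h3, Ne.symm h4, Ne.symm h5, Ne.symm h6]

lemma subEsc_bs (c : Char) (rs : List Char) :
    subEsc ('\\' :: c :: rs) = PySem.Dict.getD escDict c c :: subEsc rs := by
  simp [subEsc]

lemma subEsc_ne {c : Char} (h : c ≠ '\\') (rs : List Char) :
    subEsc (c :: rs) = c :: subEsc rs := by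
  rw [subEsc.eq_def]
  cases rs <;> simp [h]

lemma unescALoop_eq (cs : List Char) (i : Nat) (out : List Char) :
    unescALoop cs i out = out ++ subEsc (cs.drop i) := by
  by_cases h : i < cs.length
  · rw [unescALoop]
    have hdrop : cs.drop i = cs[i] :: cs.drop (i + 1) := List.drop_eq_getElem_cons h
    by_cases hb : cs.getD i ' ' = '\\' ∧ i + 1 < cs.length
    · obtain ⟨hbs, h1⟩ := hb
      have hdrop1 : cs.drop (i + 1) = cs[i + 1] :: cs.drop (i + 2) :=
        List.drop_eq_getElem_cons h1
      rw [dif_pos h, if_pos ⟨hbs, h1⟩, unescALoop_eq cs (i + 2)]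
      rw [hdrop, hdrop1]
      rw [List.getD_eq_getElem cs ' ' h] at hbs
      rw [hbs, subEsc_bs, repl_eq]
      simp [List.getD, List.getElem?_eq_getElem h1]
    · rw [dif_pos h, if_neg hb, unescALoop_eq cs (i + 1)]
      rw [hdrop, List.getD_eq_getElem cs ' ' h]
      rcases Decidable.em (cs[i] = '\\') with heq | hne
      · have h1 : ¬ i + 1 < cs.length := by
          intro h1'
          exact hb ⟨by rw [List.getD_eq_getElem cs ' ' h]; exact heq, h1'⟩
        have : cs.drop (i + 1) = [] := List.drop_eq_nil_of_le (by omega)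
        rw [this, heq]
        simp [subEsc]
      · rw [subEsc_ne hne]
        simp
  · rw [unescALoop, dif_neg h, List.drop_eq_nil_of_le (by omega)]
    simp [subEsc]
termination_by cs.length - i


-- ===== VERDICT (by name: the statement is the Claim_ definition above) =====
theorem unescape_json_string_value_py_spec : Claim_equal_unescape_json_string_value_py := by
  intro s _
  unfold Spec_unescape_json_string_value_py unescape_json_string_value_py unescape_json_string_value_py_alt
  rw [unescALoop_eq]
  simp
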